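-- pv_equiv track=rewrite | github.com/jrober84/parsityper | parsityper/helpers.py | count_ambig
-- ===== SOURCE A (Python) =====
-- def count_kmers(seq, K=2):
--     mers = {}
--     """Count kmers in sequence"""
--     for i in range(0,len(seq)):
--         mer = list(seq[i:i+K])
--         mer.sort()
--         mer = ''.join(mer)
--         if len(mer) != K:
--             continue
--         if not mer in mers:
--             mers[mer] = 0
--         mers[mer]+=1
--     return mers
--
-- def count_ambig(seq):
--     # count ambiguous characters
--     bases = ['A', 'T', 'C', 'G']
--     nt_count = 0
--     mers = count_kmers(seq, K=1)
--     for b in bases: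
--         if b in mers:
--             nt_count += mers[b]
--     return (len(seq) - nt_count)
-- ===== SOURCE B (Python) =====
-- def count_ambig(seq):
--     # single pass: count characters that are not a plain base
--     bases = {'A', 'T', 'C', 'G'}
--     return sum(1 for c in seq if c not in bases)
-- ===== Notes on version B (the rewrite author's own statement) =====
-- stated objective: simpler
-- what changed: Replaced the count_kmers frequency-dict build plus the len(seq)-minus-base-counts arithmetic with one direct pass that counts the characters that are not one of the four plain DNA bases.
import Mathlib
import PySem

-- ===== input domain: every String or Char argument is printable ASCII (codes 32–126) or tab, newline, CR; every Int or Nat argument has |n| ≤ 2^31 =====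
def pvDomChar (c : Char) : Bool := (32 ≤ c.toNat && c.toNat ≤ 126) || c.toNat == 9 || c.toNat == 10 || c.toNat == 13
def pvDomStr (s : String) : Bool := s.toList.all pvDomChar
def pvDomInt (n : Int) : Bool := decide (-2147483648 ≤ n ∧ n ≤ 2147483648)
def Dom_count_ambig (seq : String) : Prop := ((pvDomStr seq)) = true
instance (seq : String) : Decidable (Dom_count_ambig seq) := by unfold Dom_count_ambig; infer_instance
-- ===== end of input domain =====

-- B replaces A's count_kmers frequency-dict build and len-minus-bases subtraction by one
-- direct pass counting the characters that are not one of the four plain bases (objective: simpler).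

-- ===== PORT A =====
-- helper of A: count_kmers(seq, K) — dict from sorted K-mer (joined to a string) to its count.
-- ''.join of a list of single characters is exactly String.ofList of that char list.
def count_kmers (seq : String) (K : Int) : PySem.Dict String Int :=
  (PySem.List.pyRange 0 (PySem.Str.len seq) 1).foldl (fun mers i =>
    let mer : List Char :=
      PySem.List.sorted (PySem.List.slice seq.toList (some i) (some (i + K))) (fun x => x) false
    let merS : String := String.ofList mer
    if (mer.length : Int) ≠ K then mers
    else
      let mers1 := if mers.contains merS then mers else mers.insert merS 0
      mers1.insert merS (mers1.getD merS 0 + 1)) PySem.Dict.empty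

def count_ambig (seq : String) : Int :=
  let bases : List String := ["A", "T", "C", "G"]
  let mers := count_kmers seq 1
  let nt_count := bases.foldl
    (fun acc b => if mers.contains b then acc + mers.getD b 0 else acc) (0 : Int)
  PySem.Str.len seq - nt_count

-- ===== PORT B =====
def count_ambig_alt (seq : String) : Int :=
  let bases : PySem.Set Char := PySem.Set.ofList ['A', 'T', 'C', 'G']
  seq.toList.foldl (fun acc c => if c ∉ bases then acc + 1 else acc) (0 : Int)

-- ===== PRECONDITION & SPEC =====
def Spec_count_ambig (seq : String) (out : Int) : Prop := out = count_ambig_alt seq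
instance (seq : String) (out : Int) : Decidable (Spec_count_ambig seq out) := by unfold Spec_count_ambig; infer_instance

-- ===== CLAIM (what is proved, stated in full; the proofs are below) =====
def Claim_equal_count_ambig : Prop := ∀ (seq : String), Dom_count_ambig seq → Spec_count_ambig seq (count_ambig seq)

-- ===== LEMMAS AND PROOFS =====

-- A's "if mer not in mers: mers[mer]=0; mers[mer]+=1" is one counting insert.
theorem pv_body_eq (d : PySem.Dict String Int) (k : String) :
    (if d.contains k = true then d else d.insert k 0).insert k
      ((if d.contains k = true then d else d.insert k 0).getD k 0 + 1)
    = d.insert k (d.getD k 0 + 1) := by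
  by_cases h : d.contains k = true
  · simp [h]
  · simp only [Bool.not_eq_true] at h
    simp [h, PySem.Dict.getD_insert_self, PySem.Dict.insert_insert_self,
      PySem.Dict.getD_of_not_contains d 0 h]

theorem pv_sorted_singleton (c : Char) :
    PySem.List.sorted [c] (fun x : Char => x) false = [c] :=
  List.perm_singleton.mp (PySem.List.sorted_perm [c] (fun x : Char => x) false)

-- the K=1 kmer loop is a plain character counter over the single-char strings
theorem pv_kmers_fold (xs : List Char) (n : Nat) (hn : n ≤ xs.length) (d : PySem.Dict String Int) :
    (List.range n).foldl (fun mers (k : Nat) =>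
      let mer : List Char :=
        PySem.List.sorted (PySem.List.slice xs (some (k : Int)) (some ((k : Int) + 1))) (fun x => x) false
      let merS : String := String.ofList mer
      if (mer.length : Int) ≠ 1 then mers
      else
        let mers1 := if mers.contains merS then mers else mers.insert merS 0
        mers1.insert merS (mers1.getD merS 0 + 1)) d
    = ((xs.take n).map (fun c => String.ofList [c])).foldl
        (fun d k => d.insert k (d.getD k 0 + 1)) d := by
  induction n generalizing d with
  | zero => simp
  | succ m ih =>
    have hm : m < xs.length := by omega
    rw [List.range_succ, List.foldl_append, ih (by omega)]
    have hslice : PySem.List.slice xs (some (m : Int)) (some ((m : Int) + 1)) = [xs[m]] := by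
      have h1 : PySem.List.slice xs (some (m : Int)) (some ((m : Int) + (1 : Nat))) =
          (xs.drop m).take 1 := PySem.List.slice_natCast_add xs m 1
      rw [show ((m : Int) + 1) = ((m : Int) + (1 : Nat)) by norm_num, h1]
      simpa using List.take_one_drop_eq_of_lt_length hm
    have htake : xs.take (m + 1) = xs.take m ++ [xs[m]] := by
      rw [List.take_add_one]
      simp [List.getElem?_eq_getElem hm]
    rw [htake]
    simp only [List.foldl_cons, List.foldl_nil, List.map_append, List.map_cons, List.map_nil,
      List.foldl_append, hslice, pv_sorted_singleton]
    norm_num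
    exact pv_body_eq _ _

theorem pv_strmk_injective : Function.Injective (fun c : Char => String.ofList [c]) := by
  intro a b h
  have h2 := congrArg String.toList h
  simp only [String.toList_ofList, List.cons.injEq, and_true] at h2
  exact h2

theorem pv_kmers_getD (seq : String) (c : Char) :
    (count_kmers seq 1).getD (String.ofList [c]) 0 = (seq.toList.count c : Int) := by
  unfold count_kmers
  rw [PySem.Str.len_eq, PySem.List.pyRange_zero_natCast, List.foldl_map]
  rw [pv_kmers_fold seq.toList seq.toList.length (le_refl _) PySem.Dict.empty]
  rw [List.take_length, PySem.Dict.getD_foldl_insert_add_one]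
  rw [List.count_map_of_injective _ _ pv_strmk_injective]
  simp [PySem.Dict.getD_empty]

theorem pv_kmers_contains (seq : String) (b : String) :
    (count_kmers seq 1).contains b = true ↔ b ∈ seq.toList.map (fun c => String.ofList [c]) := by
  unfold count_kmers
  rw [PySem.Str.len_eq, PySem.List.pyRange_zero_natCast, List.foldl_map]
  rw [pv_kmers_fold seq.toList seq.toList.length (le_refl _) PySem.Dict.empty, List.take_length]
  rw [PySem.Dict.contains_iff_mem_keys, PySem.Dict.keys_foldl_insert]
  simp [PySem.Set.mem_update, PySem.Dict.keys_empty]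

theorem pv_nt_step (seq : String) (c : Char) (acc : Int) :
    (if (count_kmers seq 1).contains (String.ofList [c])
      then acc + (count_kmers seq 1).getD (String.ofList [c]) 0 else acc)
    = acc + (seq.toList.count c : Int) := by
  by_cases h : (count_kmers seq 1).contains (String.ofList [c]) = true
  · rw [if_pos h, pv_kmers_getD]
  · rw [if_neg h]
    have hmem : String.ofList [c] ∉ seq.toList.map (fun c => String.ofList [c]) := by
      intro hm
      exact h ((pv_kmers_contains seq _).mpr hm)
    have : c ∉ seq.toList := fun hc => hmem (List.mem_map_of_mem hc)
    rw [List.count_eq_zero_of_not_mem this]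
    simp

theorem pv_count_arith (xs : List Char) :
    xs.count 'A' + xs.count 'T' + xs.count 'C' + xs.count 'G'
      + xs.countP (fun c => decide (c ∉ (PySem.Set.ofList ['A', 'T', 'C', 'G'] : PySem.Set Char)))
      = xs.length := by
  induction xs with
  | nil => simp
  | cons c t ih =>
    simp only [List.count_cons, List.countP_cons, List.length_cons]
    by_cases h1 : c = 'A' <;> by_cases h2 : c = 'T' <;> by_cases h3 : c = 'C' <;>
      by_cases h4 : c = 'G' <;>
      simp_all [PySem.Set.ofList, PySem.Set.add, PySem.Set.contains] <;> omega

-- ===== VERDICT (by name: the statement is the Claim_ definition above) =====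
theorem count_ambig_spec : Claim_equal_count_ambig := by
  intro seq _
  unfold Spec_count_ambig count_ambig count_ambig_alt
  simp only
  rw [PySem.List.foldl_ite_add_one]
  have h1 : ("A" : String) = String.ofList ['A'] := rfl
  have h2 : ("T" : String) = String.ofList ['T'] := rfl
  have h3 : ("C" : String) = String.ofList ['C'] := rfl
  have h4 : ("G" : String) = String.ofList ['G'] := rfl
  simp only [List.foldl_cons, List.foldl_nil, h1, h2, h3, h4, pv_nt_step]
  rw [PySem.Str.len_eq]
  have := pv_count_arith seq.toList
  omega
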